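-- pv_equiv track=rewrite | github.com/edonasaliu/Connect-4 | gameplay/game_play_helpers.py | count_in_line
-- ===== SOURCE A (Python) =====
-- def count_in_line(line, length, symbol):
--     """
--     Counts the number of consecutive occurrences of a given symbol in a line.
--
--     Args:
--         line (list): The line to search for consecutive occurrences.
--         length (int): The desired length of consecutive occurrences.
--         symbol: The symbol to count.
--
--     Returns:
--         int: The number of times the symbol appears consecutively in the line.
--     """
--     count = 0
--     consecutive = 0
--     for value in line:
--         if value == symbol:
--             consecutive += 1
--             if consecutive == length:
--                 count += 1
--         else:
--             consecutive = 0
--     return count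
-- ===== SOURCE B (Python) =====
-- def count_in_line(line, length, symbol):
--     # Run-splitting scan: jump over each maximal run of equal values and
--     # count the symbol runs long enough, instead of a per-element counter.
--     if length < 1:
--         return 0
--     count = 0
--     i = 0
--     n = len(line)
--     while i < n:
--         j = i + 1
--         while j < n and line[j] == line[i]:
--             j += 1
--         if line[i] == symbol and j - i >= length:
--             count += 1
--         i = j
--     return count
-- ===== Notes on version B (the rewrite author's own statement) =====
-- stated objective: alternative
-- what changed: B splits the line into maximal runs of equal values and counts the symbol runs of length >= length (with an explicit guard for length < 1), instead of A's per-element consecutive counter with an equality check at every step.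
import Mathlib
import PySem

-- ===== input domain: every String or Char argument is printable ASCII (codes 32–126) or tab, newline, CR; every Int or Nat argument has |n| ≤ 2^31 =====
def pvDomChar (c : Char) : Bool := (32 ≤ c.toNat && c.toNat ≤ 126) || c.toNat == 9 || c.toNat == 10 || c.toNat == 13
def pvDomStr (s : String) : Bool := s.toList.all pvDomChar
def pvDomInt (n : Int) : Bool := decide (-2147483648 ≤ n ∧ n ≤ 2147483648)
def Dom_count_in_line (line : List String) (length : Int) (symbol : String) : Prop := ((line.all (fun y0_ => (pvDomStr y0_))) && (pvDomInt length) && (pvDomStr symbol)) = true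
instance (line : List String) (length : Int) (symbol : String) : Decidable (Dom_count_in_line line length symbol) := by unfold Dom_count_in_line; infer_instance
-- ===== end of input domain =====

-- B replaces A's per-element consecutive counter by a run-splitting scan over maximal runs; alternative decomposition, same cost.


-- ===== PORT A =====
-- A's for-loop over (count, consecutive), transcribed as structural recursion on the line.
def loopA (line : List String) (count consecutive : Int) (length : Int) (symbol : String) : Int :=
  match line with
  | [] => count
  | value :: rest =>
    if value = symbol then
      let c := consecutive + 1
      loopA rest (if c = length then count + 1 else count) c length symbol
    else
      loopA rest count 0 length symbol

def count_in_line (line : List String) (length : Int) (symbol : String) : Int :=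
  loopA line 0 0 length symbol

-- ===== PORT B =====
-- B's outer while loop: peel off the maximal run starting at the head (the inner
-- 'while line[j] == line[i]' is the takeWhile/dropWhile split of the tail).
def runLoopB (line : List String) (length : Int) (symbol : String) : Int :=
  match line with
  | [] => 0
  | x :: xs =>
    let run := xs.takeWhile (fun y => y = x)
    let rest := xs.dropWhile (fun y => y = x)
    (if x = symbol ∧ length ≤ (run.length : Int) + 1 then 1 else 0)
      + runLoopB rest length symbol
termination_by line.length
decreasing_by
  exact Nat.lt_succ_of_le (List.length_dropWhile_le _ _)

def count_in_line_alt (line : List String) (length : Int) (symbol : String) : Int :=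
  if length < 1 then 0 else runLoopB line length symbol

-- ===== PRECONDITION & SPEC =====
def Spec_count_in_line (line : List String) (length : Int) (symbol : String) (out : Int) : Prop := out = count_in_line_alt line length symbol
instance (line : List String) (length : Int) (symbol : String) (out : Int) : Decidable (Spec_count_in_line line length symbol out) := by unfold Spec_count_in_line; infer_instance

-- ===== CLAIM (what is proved, stated in full; the proofs are below) =====
def Claim_equal_count_in_line : Prop := ∀ (line : List String) (length : Int) (symbol : String), Dom_count_in_line line length symbol → Spec_count_in_line line length symbol (count_in_line line length symbol)

-- ===== LEMMAS AND PROOFS =====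

-- A's accumulator 'count' just adds up.
theorem loopA_count (line : List String) (count consecutive length : Int) (symbol : String) :
    loopA line count consecutive length symbol = count + loopA line 0 consecutive length symbol := by
  induction line generalizing count consecutive with
  | nil => simp [loopA]
  | cons v rest ih =>
    simp only [loopA]
    split_ifs with hv hc
    · rw [ih (count + 1), ih (0 + 1)]; ring
    · exact ih count _
    · exact ih count 0

-- if length ≤ 0, A never counts (consecutive stays ≥ 0, so it never equals length)
theorem loopA_nonpos (line : List String) (consecutive length : Int) (symbol : String)
    (h : length ≤ 0) (hc : 0 ≤ consecutive) :
    loopA line 0 consecutive length symbol = 0 := by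
  induction line generalizing consecutive with
  | nil => rfl
  | cons v rest ih =>
    simp only [loopA]
    split_ifs with hv hcl
    · omega
    · exact ih _ (by omega)
    · exact ih 0 (by omega)

-- over a block of symbols, A counts exactly once iff the threshold is crossed inside it
theorem loopA_run (run rest : List String) (c length : Int) (symbol : String)
    (hall : ∀ y ∈ run, y = symbol) (hc : 0 ≤ c) :
    loopA (run ++ rest) 0 c length symbol
      = (if c < length ∧ length ≤ c + (run.length : Int) then 1 else 0)
        + loopA rest 0 (c + (run.length : Int)) length symbol := by
  induction run generalizing c with
  | nil =>
    simp only [List.nil_append, List.length_nil, Nat.cast_zero, add_zero]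
    rw [if_neg (by omega)]; ring
  | cons x run ih =>
    simp only [List.cons_append, loopA, if_pos (hall x (by simp))]
    rw [loopA_count, ih (c + 1) (fun y hy => hall y (by simp [hy])) (by omega)]
    have hcast : c + ((run.length + 1 : ℕ) : Int) = c + 1 + (run.length : Int) := by
      push_cast; ring
    simp only [List.length_cons, hcast]
    split_ifs <;> omega

-- a block of non-symbols resets the counter and contributes nothing
theorem loopA_skip (run rest : List String) (length : Int) (symbol : String)
    (hall : ∀ y ∈ run, y ≠ symbol) :
    loopA (run ++ rest) 0 0 length symbol = loopA rest 0 0 length symbol := by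
  induction run with
  | nil => rfl
  | cons v run ih =>
    simp only [List.cons_append, loopA, if_neg (hall v (by simp))]
    exact ih (fun y hy => hall y (by simp [hy]))

-- the element after a dropWhile (if any) fails the predicate
theorem dropWhile_head_false {p : String → Bool} (xs : List String) (h : String) (t' : List String)
    (he : xs.dropWhile p = h :: t') : p h = false := by
  induction xs with
  | nil => simp [List.dropWhile] at he
  | cons a xs ih =>
    rw [List.dropWhile_cons] at he
    by_cases hp : p a
    · exact ih (by rwa [if_pos hp] at he)
    · rw [if_neg hp] at he
      injection he with h1 _
      subst h1
      simpa using hp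

theorem loopA_reset (rest : List String) (c length : Int) (symbol : String)
    (h : ∀ h' t', rest = h' :: t' → h' ≠ symbol) :
    loopA rest 0 c length symbol = loopA rest 0 0 length symbol := by
  cases rest with
  | nil => rfl
  | cons v t =>
    simp only [loopA, if_neg (h v t rfl)]

theorem main_aux (length : Int) (symbol : String) (hlen : 1 ≤ length) :
    ∀ n (line : List String), line.length ≤ n →
      loopA line 0 0 length symbol = runLoopB line length symbol := by
  intro n
  induction n with
  | zero =>
    intro line hl
    rw [List.length_eq_zero_iff.mp (Nat.le_zero.mp hl)]
    simp [loopA, runLoopB]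
  | succ n ih =>
    intro line hl
    cases line with
    | nil => simp [loopA, runLoopB]
    | cons x xs =>
      have hsplit : xs = xs.takeWhile (fun y => y = x) ++ xs.dropWhile (fun y => y = x) :=
        (List.takeWhile_append_dropWhile).symm
      have hrest : (xs.dropWhile (fun y => y = x)).length ≤ n := by
        have := List.length_dropWhile_le (fun y => decide (y = x)) xs
        simp only [List.length_cons] at hl
        omega
      by_cases hx : x = symbol
      · have hall : ∀ y ∈ x :: xs.takeWhile (fun y => y = x), y = symbol := by
          intro y hy
          rcases List.mem_cons.mp hy with h | h
          · rw [h, hx]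
          · have hyx : y = x :=
              of_decide_eq_true (List.mem_takeWhile_imp (p := fun y => decide (y = x)) h)
            rw [hyx, hx]
        calc loopA (x :: xs) 0 0 length symbol
            = loopA ((x :: xs.takeWhile (fun y => y = x)) ++ xs.dropWhile (fun y => y = x))
                0 0 length symbol := by rw [List.cons_append, ← hsplit]
          _ = (if 0 < length ∧ length ≤ 0 + ((x :: xs.takeWhile (fun y => y = x)).length : Int)
                then 1 else 0)
              + loopA (xs.dropWhile (fun y => y = x)) 0
                  (0 + ((x :: xs.takeWhile (fun y => y = x)).length : Int)) length symbol := by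
              exact loopA_run _ _ 0 length symbol hall le_rfl
          _ = runLoopB (x :: xs) length symbol := by
              rw [loopA_reset _ _ _ _ (by
                intro h' t' he hcon
                have hf := dropWhile_head_false xs h' t' he
                rw [hcon, hx] at hf; simp at hf)]
              rw [ih _ hrest]
              rw [runLoopB]
              simp only [List.length_cons, hx, true_and, Nat.cast_add, Nat.cast_one, zero_add]
              have h0 : (0:Int) < length := by omega
              simp [h0]
      · have hall : ∀ y ∈ x :: xs.takeWhile (fun y => y = x), y ≠ symbol := by
          intro y hy
          rcases List.mem_cons.mp hy with h | h
          · rw [h]; exact hx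
          · have hyx : y = x :=
              of_decide_eq_true (List.mem_takeWhile_imp (p := fun y => decide (y = x)) h)
            rw [hyx]; exact hx
        calc loopA (x :: xs) 0 0 length symbol
            = loopA ((x :: xs.takeWhile (fun y => y = x)) ++ xs.dropWhile (fun y => y = x))
                0 0 length symbol := by rw [List.cons_append, ← hsplit]
          _ = loopA (xs.dropWhile (fun y => y = x)) 0 0 length symbol := loopA_skip _ _ _ _ hall
          _ = runLoopB (x :: xs) length symbol := by
              rw [ih _ hrest, runLoopB]
              simp [hx]

-- ===== VERDICT (by name: the statement is the Claim_ definition above) =====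
theorem count_in_line_spec : Claim_equal_count_in_line := by
  intro line length symbol _
  unfold Spec_count_in_line count_in_line count_in_line_alt
  split_ifs with h
  · exact loopA_nonpos line 0 length symbol (by omega) le_rfl
  · exact main_aux length symbol (by omega) line.length line le_rfl
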